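-- pv_equiv track=rewrite | github.com/cr2551/advent_of_code_2023 | day3/part2.py | detect_adjacent_numbers
-- ===== SOURCE A (Python) =====
-- def detect_adjacent_numbers(array, row, col):
--     """give the row and col of a `*` look for adjacent numbers"""
--     # look in the 3x3 matrix where * is the center, for digits
--     adjacent_numbers = []
--     for i in range(-1, 2):
--         # list used to store the colum indeces of the number
--         num_indeces = []
--         if (row + i) >= 0 and (row + i) < len(array[row]):
--             for j in range(-1, 2):
--                 if (col + j) >= 0 and (col + j) < len(array[row]):
--                     char = array[row + i][col + j]
--                     if char.isdigit():
--                         # i need to avoid calling this function for digits which form part of the same number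
--                         if (col + j) not in num_indeces:
--                             number, num_indeces = get_number(array, row + i, col + j)
--                             adjacent_numbers.append(number)
--     return adjacent_numbers
--
-- def get_number(array, row, col):
--     """Given the location of a digit follow it backwards until char is no longer a digit
--     at that point go forwards to get the full number"""
--     # store the indeces of each digit that's in the number and return this list
--     # it will be useful later to avoid callin the same function on the same number
--     num_indeces = []
--     char = array[row][col]
--     left_offset = 0
--     # go bakcwards
--     while char.isdigit():
--         left_offset += 1
--         if (col - left_offset) >= 0:
--             char = array[row][col - left_offset]
--         else:
--             break
--     # col will now be the first digit of the number
--     # we need to add a plus one because left offset will be one place behind the start of digits.l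
--     col = col - left_offset + 1
--     # now go forwards
--     right_offset = 0
--     number = ''
--     char = array[row][col]
--
--     while char.isdigit():
--         number += char
--         num_indeces.append(col + right_offset)
--         right_offset += 1
--         # if the last char in a row is a digit then the while loop will never stop unless we break
--         if (col + right_offset) < len(array[row]):
--             char = array[row][col + right_offset]
--         else:
--             break
--     return int(number), num_indeces
-- ===== SOURCE B (Python) =====
-- def detect_adjacent_numbers(array, row, col):
--     """give the row and col of a `*` look for adjacent numbers"""
--     adjacent_numbers = []
--     # NOTE: bound checks deliberately compare against len(array[row]) (the center
--     # row's length), matching the original's guard.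
--     for r in (row - 1, row, row + 1):
--         seen_starts = set()
--         if 0 <= r < len(array[row]):
--             for c in (col - 1, col, col + 1):
--                 if 0 <= c < len(array[row]) and array[r][c].isdigit():
--                     line = array[r]
--                     # expand left to the start of this digit run
--                     s = c
--                     while s - 1 >= 0 and line[s - 1].isdigit():
--                         s -= 1
--                     if s not in seen_starts:
--                         seen_starts.add(s)
--                         # expand right to the end of the run
--                         e = c
--                         while e + 1 < len(line) and line[e + 1].isdigit():
--                             e += 1
--                         adjacent_numbers.append(int(line[s:e + 1]))
--     return adjacent_numbers
-- ===== Notes on version B (the rewrite author's own statement) =====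
-- stated objective: alternative
-- what changed: B drops A's get_number helper (digit-by-digit backward walk, then a forward walk rebuilding the number a character at a time together with a per-number column-index list used for dedup) and instead, per window cell, expands to the digit run's start and end columns, dedups by a per-row set of already-emitted run-start columns, and converts the whole slice line[s:e+1] with one int() call.
import Mathlib
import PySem

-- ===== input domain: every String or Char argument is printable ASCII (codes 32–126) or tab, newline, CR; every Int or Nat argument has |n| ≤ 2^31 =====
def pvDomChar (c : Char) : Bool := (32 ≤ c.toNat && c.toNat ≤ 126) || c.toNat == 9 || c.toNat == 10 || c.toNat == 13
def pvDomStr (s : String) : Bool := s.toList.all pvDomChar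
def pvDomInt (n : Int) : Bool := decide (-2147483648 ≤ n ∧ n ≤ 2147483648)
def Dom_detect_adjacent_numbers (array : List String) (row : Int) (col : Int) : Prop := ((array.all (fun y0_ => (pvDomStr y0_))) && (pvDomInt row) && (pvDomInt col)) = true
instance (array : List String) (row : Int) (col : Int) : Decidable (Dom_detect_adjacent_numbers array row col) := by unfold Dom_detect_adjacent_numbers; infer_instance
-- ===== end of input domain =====

-- B replaces A's digit-by-digit backward/forward `get_number` helper (which threads a
-- per-number index list for dedup) by a per-window run expansion deduplicated on run
-- start columns; an alternative decomposition of the same cost, not claimed faster.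


-- ===== PORT A =====
-- row r of the grid, as a list of chars ('' where Python would raise; Pre_ excludes those)
def pvLine (array : List String) (r : Int) : List Char :=
  ((PySem.List.pyGet? array r).getD "").toList

-- the backward while-loop of get_number: returns the final left_offset (fuel-bounded;
-- on the calls made the fuel is never exhausted)
def pvA_back (line : List Char) (col : Int) (char : Char) (lo : Int) : Nat → Int
  | 0 => lo
  | fuel + 1 =>
    if PySem.Chars.isdigit char then
      if col - (lo + 1) ≥ 0 then
        pvA_back line col (PySem.List.pyGetD line (col - (lo + 1)) ' ') (lo + 1) fuel
      else lo + 1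
    else lo

-- the forward while-loop of get_number: accumulates the number's chars and index list
def pvA_fwd (line : List Char) (col : Int) (char : Char) (ro : Int)
    (number : List Char) (idxs : List Int) : Nat → List Char × List Int
  | 0 => (number, idxs)
  | fuel + 1 =>
    if PySem.Chars.isdigit char then
      let number := number ++ [char]
      let idxs := idxs ++ [col + ro]
      if col + (ro + 1) < (line.length : Int) then
        pvA_fwd line col (PySem.List.pyGetD line (col + (ro + 1)) ' ') (ro + 1) number idxs fuel
      else (number, idxs)
    else (number, idxs)

-- get_number(array, row, col)
def pvA_getNumber (array : List String) (row : Int) (col : Int) : Int × List Int :=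
  let line := pvLine array row
  let char := PySem.List.pyGetD line col ' '
  let lo := pvA_back line col char 0 (col.toNat + 2)
  let col' := col - lo + 1
  let char' := PySem.List.pyGetD line col' ' '
  let r := pvA_fwd line col' char' 0 [] [] (line.length + 1)
  ((PySem.Int.ofChars? r.1).getD 0, r.2)

-- the body of the inner j-loop (num_indeces, adjacent_numbers are the two state fields)
def pvAstep (array : List String) (r L col : Int) : List Int × List Int → Int → List Int × List Int :=
  fun st j =>
    if 0 ≤ col + j ∧ col + j < L then
      if PySem.Chars.isdigit (PySem.List.pyGetD (pvLine array r) (col + j) ' ') then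
        if ¬ (col + j) ∈ st.1 then
          let g := pvA_getNumber array r (col + j)
          (g.2, st.2 ++ [g.1])
        else st
      else st
    else st


def detect_adjacent_numbers (array : List String) (row : Int) (col : Int) : List Int :=
  let L : Int := (pvLine array row).length
  (([-1, 0, 1] : List Int).foldl (fun out i =>
    -- num_indeces is reset for each i, then threaded through the j-loop
    (if 0 ≤ row + i ∧ row + i < L then
      (([-1, 0, 1] : List Int).foldl (pvAstep array (row + i) L col) ([], out))
    else ([], out)).2) [])

-- ===== PORT B =====
-- B's left expansion: while s-1 >= 0 and line[s-1].isdigit(): s -= 1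
def pvB_left (line : List Char) (s : Int) : Nat → Int
  | 0 => s
  | fuel + 1 =>
    if s - 1 ≥ 0 ∧ PySem.Chars.isdigit (PySem.List.pyGetD line (s - 1) ' ') then
      pvB_left line (s - 1) fuel
    else s

-- B's right expansion: while e+1 < len(line) and line[e+1].isdigit(): e += 1
def pvB_right (line : List Char) (e : Int) : Nat → Int
  | 0 => e
  | fuel + 1 =>
    if e + 1 < (line.length : Int) ∧ PySem.Chars.isdigit (PySem.List.pyGetD line (e + 1) ' ') then
      pvB_right line (e + 1) fuel
    else e

-- the body of the inner c-loop (seen_starts, adjacent_numbers are the two state fields)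
def pvBstep (array : List String) (r L col : Int) : PySem.Set Int × List Int → Int → PySem.Set Int × List Int :=
  fun st c =>
    if 0 ≤ c ∧ c < L ∧ PySem.Chars.isdigit (PySem.List.pyGetD (pvLine array r) c ' ') then
      let line := pvLine array r
      let s := pvB_left line c (c.toNat + 1)
      if ¬ st.1.contains s then
        let e := pvB_right line c line.length
        (st.1.add s,
         st.2 ++ [(PySem.Int.ofChars? (PySem.List.slice line (some s) (some (e + 1)))).getD 0])
      else st
    else st


def detect_adjacent_numbers_alt (array : List String) (row : Int) (col : Int) : List Int :=
  let L : Int := (pvLine array row).length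
  (([row - 1, row, row + 1] : List Int).foldl (fun out r =>
    -- seen_starts is reset for each r, then threaded through the c-loop
    (if 0 ≤ r ∧ r < L then
      (([col - 1, col, col + 1] : List Int).foldl (pvBstep array r L col) (PySem.Set.ofList [], out))
    else (PySem.Set.ofList [], out)).2) [])

-- ===== PRECONDITION & SPEC =====
-- Pre_ holds exactly where the Python A returns without raising: whenever the row guard
-- can evaluate len(array[row]), row must be a valid (possibly negative, wrapping) index,
-- and every cell the window actually reads must exist in its (possibly ragged) row.
def Pre_detect_adjacent_numbers (array : List String) (row : Int) (col : Int) : Prop :=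
  -1 ≤ row →
    (-(array.length : Int) ≤ row ∧ row < (array.length : Int)) ∧
    (∀ i ∈ ([-1, 0, 1] : List Int), 0 ≤ row + i → row + i < ((pvLine array row).length : Int) →
      ∀ j ∈ ([-1, 0, 1] : List Int), 0 ≤ col + j → col + j < ((pvLine array row).length : Int) →
        row + i < (array.length : Int) ∧ col + j < ((pvLine array (row + i)).length : Int))
instance (array : List String) (row : Int) (col : Int) : Decidable (Pre_detect_adjacent_numbers array row col) := by unfold Pre_detect_adjacent_numbers; infer_instance

def pvWitness_detect_adjacent_numbers : List String × Int × Int := (["467..114..", "...*......", "..35..633."], 1, 3)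

def Spec_detect_adjacent_numbers (array : List String) (row : Int) (col : Int) (out : List Int) : Prop := out = detect_adjacent_numbers_alt array row col
instance (array : List String) (row : Int) (col : Int) (out : List Int) : Decidable (Spec_detect_adjacent_numbers array row col out) := by unfold Spec_detect_adjacent_numbers; infer_instance

-- ===== CLAIM (what is proved, stated in full; the proofs are below) =====
def Claim_equal_detect_adjacent_numbers : Prop := ∀ (array : List String) (row : Int) (col : Int), Dom_detect_adjacent_numbers array row col → Pre_detect_adjacent_numbers array row col → Spec_detect_adjacent_numbers array row col (detect_adjacent_numbers array row col)

-- ===== LEMMAS AND PROOFS =====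

-- `line[k].isdigit()` at a Nat index
def pvDig (line : List Char) (k : Nat) : Bool :=
  PySem.Chars.isdigit (PySem.List.pyGetD line (k : Int) ' ')

-- start of the maximal digit run ending at position c (reference function)
def pvStart (line : List Char) : Nat → Nat
  | 0 => 0
  | m + 1 => if pvDig line m then pvStart line m else m + 1

-- end of the maximal digit run beginning at position m (reference function)
def pvEnd (line : List Char) (m : Nat) : Nat :=
  if h : m + 1 < line.length ∧ pvDig line (m + 1) then pvEnd line (m + 1) else m
termination_by line.length - m
decreasing_by omega

-- the run's characters and its Int indices
def pvSegC (line : List Char) (s e : Nat) : List Char :=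
  (List.range' s (e + 1 - s)).map (fun (k : Nat) => PySem.List.pyGetD line (k : Int) ' ')
def pvSegI (s e : Nat) : List Int :=
  (List.range' s (e + 1 - s)).map (fun (k : Nat) => (k : Int))


-- -- walk characterizations --

theorem pvStart_le (line : List Char) (c : Nat) : pvStart line c ≤ c := by
  induction c with
  | zero => simp [pvStart]
  | succ m ih => unfold pvStart; split <;> omega

theorem pvStart_digits (line : List Char) (c : Nat) (hc : pvDig line c = true) :
    ∀ k, pvStart line c ≤ k → k ≤ c → pvDig line k = true := by
  induction c with
  | zero => intro k h1 h2; have : k = 0 := by omega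
            simpa [this] using hc
  | succ m ih =>
    intro k h1 h2
    by_cases hd : pvDig line m = true
    · rcases Nat.lt_or_ge k (m+1) with h | h
      · exact ih hd k (by unfold pvStart at h1; simp [hd] at h1; exact h1) (by omega)
      · have : k = m + 1 := by omega
        simpa [this] using hc
    · unfold pvStart at h1; simp [hd] at h1
      have : k = m + 1 := by omega
      simpa [this] using hc

theorem pvEnd_ge (line : List Char) (m : Nat) : m ≤ pvEnd line m := by
  fun_induction pvEnd <;> omega

theorem pvEnd_lt (line : List Char) (m : Nat) (h : m < line.length) : pvEnd line m < line.length := by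
  fun_induction pvEnd <;> omega

theorem pvEnd_step (line : List Char) (m : Nat) (h1 : m + 1 < line.length) (h2 : pvDig line (m+1) = true) :
    pvEnd line m = pvEnd line (m+1) := by
  rw [pvEnd]; simp [h1, h2]

theorem pvEnd_stop (line : List Char) (m : Nat) (h : ¬ (m + 1 < line.length ∧ pvDig line (m+1) = true)) :
    pvEnd line m = m := by
  rw [pvEnd]; split
  · rename_i hh; exact absurd hh h
  · rfl

theorem pvRun_end_eq (line : List Char) (s c : Nat) (hsc : s ≤ c) (hc : c < line.length)
    (hd : ∀ k, s ≤ k → k ≤ c → pvDig line k = true) : pvEnd line s = pvEnd line c := by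
  induction c with
  | zero => have : s = 0 := by omega
            simp [this]
  | succ m ih =>
    rcases Nat.lt_or_ge s (m+1) with h | h
    · have h1 : pvEnd line m = pvEnd line (m+1) :=
        pvEnd_step line m hc (hd (m+1) (by omega) (by omega))
      have h2 : pvEnd line s = pvEnd line m :=
        ih (by omega) (by omega) (fun k a b => hd k a (by omega))
      omega
    · have : s = m + 1 := by omega
      simp [this]


-- -- the four while-loops compute pvStart / pvEnd and the run segments --

theorem pvB_left_eq (line : List Char) (c : Nat) : ∀ fuel : Nat, c ≤ fuel →
    pvB_left line (c : Int) fuel = (pvStart line c : Int) := by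
  induction c with
  | zero =>
    intro fuel _
    cases fuel with
    | zero => simp [pvB_left, pvStart]
    | succ f => simp [pvB_left, pvStart]
  | succ m ih =>
    intro fuel hf
    cases fuel with
    | zero => omega
    | succ f =>
      have hcast : ((m + 1 : Nat) : Int) - 1 = (m : Int) := by push_cast; ring
      rw [pvB_left, hcast]
      by_cases hd : pvDig line m = true
      · rw [if_pos ⟨by omega, by simpa [pvDig] using hd⟩, ih f (by omega)]
        have : pvStart line (m+1) = pvStart line m := by rw [pvStart, if_pos hd]
        rw [this]
      · rw [if_neg (by simp [pvDig] at hd; simp [hd])]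
        have : pvStart line (m+1) = m + 1 := by rw [pvStart, if_neg hd]
        rw [this]

theorem pvA_back_eq (line : List Char) (c : Int) (m : Nat) : ∀ fuel : Nat, (m : Int) ≤ c → m + 1 ≤ fuel →
    c - pvA_back line c (PySem.List.pyGetD line (m : Int) ' ') (c - m) fuel + 1
      = if pvDig line m then (pvStart line m : Int) else (m : Int) + 1 := by
  induction m with
  | zero =>
    intro fuel hm hf
    cases fuel with
    | zero => omega
    | succ f =>
      rw [pvA_back]
      by_cases hd : pvDig line 0 = true
      · rw [if_pos (by simpa [pvDig] using hd)]
        rw [if_neg (by omega)]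
        simp [hd, pvStart]
      · rw [if_neg (by simpa [pvDig] using hd)]
        simp [hd]
  | succ m ih =>
    intro fuel hm hf
    cases fuel with
    | zero => omega
    | succ f =>
      rw [pvA_back]
      by_cases hd : pvDig line (m + 1) = true
      · rw [if_pos (by simpa [pvDig] using hd)]
        rw [if_pos (by push_cast; omega)]
        have h1 : c - (c - ((m : Int) + 1) + 1) = (m : Int) := by ring
        have h2 : c - ((m + 1 : Nat) : Int) + 1 = c - (m : Int) := by push_cast; ring
        rw [show c - (c - (((m+1 : Nat) : Int)) + 1) = (m : Int) from by push_cast; ring]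
        rw [show c - (((m+1 : Nat) : Int)) + 1 = c - (m : Int) from by push_cast; ring]
        rw [ih f (by omega) (by omega)]
        have : pvStart line (m+1) = if pvDig line m then pvStart line m else m + 1 := by rw [pvStart]
        rw [if_pos hd, this]
        split <;> push_cast <;> ring
      · rw [if_neg (by simpa [pvDig] using hd)]
        rw [if_neg hd]
        push_cast
        ring

theorem pvB_right_eq (line : List Char) : ∀ (fuel : Nat) (e : Nat), line.length - e ≤ fuel →
    pvB_right line (e : Int) fuel = (pvEnd line e : Int) := by
  intro fuel
  induction fuel with
  | zero =>
    intro e he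
    rw [pvB_right, pvEnd_stop line e (by intro ⟨h1, _⟩; omega)]
  | succ f ih =>
    intro e he
    rw [pvB_right]
    by_cases hc : e + 1 < line.length ∧ pvDig line (e + 1) = true
    · rw [if_pos ⟨by push_cast; omega, by simpa [pvDig, Int.natCast_succ] using hc.2⟩]
      rw [show (e : Int) + 1 = ((e + 1 : Nat) : Int) from by push_cast; ring]
      rw [ih (e + 1) (by omega), pvEnd_step line e hc.1 hc.2]
    · rw [if_neg (by
        intro ⟨h1, h2⟩
        exact hc ⟨by omega, by simpa [pvDig, Int.natCast_succ] using h2⟩)]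
      rw [pvEnd_stop line e hc]

-- segment cons/singleton shapes
theorem pvSegC_cons (line : List Char) (m e : Nat) (h : m ≤ e) :
    pvSegC line m e = PySem.List.pyGetD line (m : Int) ' ' :: pvSegC line (m + 1) e := by
  unfold pvSegC
  rw [show e + 1 - m = (e - m) + 1 from by omega, List.range'_succ]
  simp [show e + 1 - (m + 1) = e - m from by omega]

theorem pvSegC_single (line : List Char) (m : Nat) : pvSegC line m m = [PySem.List.pyGetD line (m : Int) ' '] := by
  simp [pvSegC]

theorem pvSegI_cons (m e : Nat) (h : m ≤ e) :
    pvSegI m e = (m : Int) :: pvSegI (m + 1) e := by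
  unfold pvSegI
  rw [show e + 1 - m = (e - m) + 1 from by omega, List.range'_succ]
  simp [show e + 1 - (m + 1) = e - m from by omega]

theorem pvSegI_single (m : Nat) : pvSegI m m = [(m : Int)] := by
  simp [pvSegI]

theorem pvA_fwd_eq (line : List Char) (s : Int) : ∀ (fuel : Nat) (m : Nat) (num : List Char) (idxs : List Int),
    m < line.length → pvDig line m = true → line.length - m ≤ fuel →
    pvA_fwd line s (PySem.List.pyGetD line (m : Int) ' ') ((m : Int) - s) num idxs fuel
      = (num ++ pvSegC line m (pvEnd line m), idxs ++ pvSegI m (pvEnd line m)) := by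
  intro fuel
  induction fuel with
  | zero => intro m num idxs h1 _ h3; omega
  | succ f ih =>
    intro m num idxs h1 h2 h3
    rw [pvA_fwd, if_pos (by simpa [pvDig] using h2)]
    simp only
    have hidx : s + ((m : Int) - s) = (m : Int) := by ring
    rw [hidx]
    by_cases hnext : m + 1 < line.length
    · rw [if_pos (by push_cast; omega)]
      rw [show s + ((m : Int) - s + 1) = ((m + 1 : Nat) : Int) from by push_cast; ring]
      by_cases hd : pvDig line (m + 1) = true
      · rw [show (m : Int) - s + 1 = ((m + 1 : Nat) : Int) - s from by push_cast; ring]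
        rw [ih (m + 1) _ _ hnext hd (by omega)]
        rw [pvEnd_step line m hnext hd]
        have hme : m ≤ pvEnd line (m + 1) := by have := pvEnd_ge line (m + 1); omega
        rw [pvSegC_cons line m _ hme, pvSegI_cons m _ hme]
        simp
      · cases f with
        | zero => omega
        | succ f' =>
          rw [pvA_fwd, if_neg (by simpa [pvDig] using hd)]
          rw [pvEnd_stop line m (by intro ⟨_, hx⟩; exact absurd hx (by simpa using hd))]
          rw [pvSegC_single, pvSegI_single]
    · rw [if_neg (by push_cast; omega)]
      rw [pvEnd_stop line m (by intro ⟨hx, _⟩; omega)]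
      rw [pvSegC_single, pvSegI_single]

theorem pvSegI_mem (s e : Nat) (x : Int) (h : s ≤ e) :
    x ∈ pvSegI s e ↔ (s : Int) ≤ x ∧ x ≤ (e : Int) := by
  unfold pvSegI
  rw [List.mem_map]
  constructor
  · rintro ⟨k, hk, rfl⟩
    rw [List.mem_range'_1] at hk
    omega
  · intro ⟨h1, h2⟩
    refine ⟨x.toNat, ?_, by omega⟩
    rw [List.mem_range'_1]
    omega

theorem pvSlice_eq_seg (line : List Char) (s e : Nat) (hse : s ≤ e) (he : e < line.length) :
    PySem.List.slice line (some (s : Int)) (some ((e : Int) + 1)) = pvSegC line s e := by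
  rw [show (e : Int) + 1 = ((e + 1 : Nat) : Int) from by push_cast; ring]
  rw [PySem.List.slice_natCast]
  apply List.ext_getElem
  · simp [pvSegC]; omega
  · intro i h1 h2
    have hi : i < e + 1 - s := by simpa [pvSegC] using h2
    simp only [pvSegC, List.getElem_map, List.getElem_range']
    rw [List.getElem_take, List.getElem_drop]
    rw [PySem.List.pyGetD_eq_getElem line ' ' (by omega) (by push_cast; omega)]
    congr 1
    omega

theorem pvA_getNumber_eq (array : List String) (r : Int) (c : Nat)
    (hlen : c < (pvLine array r).length) (hdig : pvDig (pvLine array r) c = true) :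
    pvA_getNumber array r (c : Int) =
      ((PySem.Int.ofChars? (pvSegC (pvLine array r) (pvStart (pvLine array r) c) (pvEnd (pvLine array r) c))).getD 0,
       pvSegI (pvStart (pvLine array r) c) (pvEnd (pvLine array r) c)) := by
  unfold pvA_getNumber
  simp only
  set line := pvLine array r with hline
  have hback := pvA_back_eq line (c : Int) c ((c : Int).toNat + 2) (le_refl _) (by simp)
  rw [show (c : Int) - (c : Nat) = 0 from by push_cast; ring] at hback
  rw [if_pos hdig] at hback
  -- the new column is the run start
  have hcol : (c : Int) - pvA_back line (c : Int) (PySem.List.pyGetD line (c : Int) ' ') 0 ((c : Int).toNat + 2) + 1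
      = ((pvStart line c : Nat) : Int) := hback
  rw [hcol]
  have hs_le : pvStart line c ≤ c := pvStart_le line c
  have hs_dig : pvDig line (pvStart line c) = true :=
    pvStart_digits line c hdig _ (le_refl _) hs_le
  have hfwd := pvA_fwd_eq line ((pvStart line c : Nat) : Int) (line.length + 1) (pvStart line c) [] []
      (by omega) hs_dig (by omega)
  rw [show ((pvStart line c : Nat) : Int) - ((pvStart line c : Nat) : Int) = 0 from by ring] at hfwd
  rw [hfwd]
  have hrun : pvEnd line (pvStart line c) = pvEnd line c :=
    pvRun_end_eq line (pvStart line c) c hs_le hlen (pvStart_digits line c hdig)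
  rw [hrun]
  simp

theorem pvAstep_out (array : List String) (r L col : Int) (st : List Int × List Int) (j : Int) :
    pvAstep array r L col st j
      = ((pvAstep array r L col (st.1, []) j).1, st.2 ++ (pvAstep array r L col (st.1, []) j).2) := by
  unfold pvAstep
  split_ifs <;> simp

theorem pvBstep_out (array : List String) (r L col : Int) (st : PySem.Set Int × List Int) (c : Int) :
    pvBstep array r L col st c
      = ((pvBstep array r L col (st.1, []) c).1, st.2 ++ (pvBstep array r L col (st.1, []) c).2) := by
  unfold pvBstep
  split_ifs <;> (try simp) <;> split <;> simp

theorem pvAfold_out (array : List String) (r L col : Int) (js : List Int) :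
    ∀ (st : List Int × List Int), js.foldl (pvAstep array r L col) st
      = ((js.foldl (pvAstep array r L col) (st.1, [])).1,
         st.2 ++ (js.foldl (pvAstep array r L col) (st.1, [])).2) := by
  induction js with
  | nil => intro st; simp
  | cons j js ih =>
    intro st
    simp only [List.foldl_cons]
    rw [pvAstep_out array r L col st j]
    rw [ih ((pvAstep array r L col (st.1, []) j).1, st.2 ++ (pvAstep array r L col (st.1, []) j).2)]
    rw [ih (pvAstep array r L col (st.1, []) j)]
    simp

theorem pvBfold_out (array : List String) (r L col : Int) (cs : List Int) :
    ∀ (st : PySem.Set Int × List Int), cs.foldl (pvBstep array r L col) st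
      = ((cs.foldl (pvBstep array r L col) (st.1, [])).1,
         st.2 ++ (cs.foldl (pvBstep array r L col) (st.1, [])).2) := by
  induction cs with
  | nil => intro st; simp
  | cons c cs ih =>
    intro st
    simp only [List.foldl_cons]
    rw [pvBstep_out array r L col st c]
    rw [ih ((pvBstep array r L col (st.1, []) c).1, st.2 ++ (pvBstep array r L col (st.1, []) c).2)]
    rw [ih (pvBstep array r L col (st.1, []) c)]
    simp

-- the per-row emitted lists
def pvRowA (array : List String) (r L col : Int) : List Int :=
  (([-1, 0, 1] : List Int).foldl (pvAstep array r L col) ([], [])).2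
def pvRowB (array : List String) (r L col : Int) : List Int :=
  (([col - 1, col, col + 1] : List Int).foldl (pvBstep array r L col) (PySem.Set.ofList [], [])).2

-- value of the run through cell n
def pvVal (line : List Char) (n : Nat) : Int :=
  (PySem.Int.ofChars? (pvSegC line (pvStart line n) (pvEnd line n))).getD 0

theorem pvAstep_skip (array : List String) (r L col : Int) (st : List Int × List Int) (j : Int)
    (h : ¬ (0 ≤ col + j ∧ col + j < L) ∨ PySem.Chars.isdigit (PySem.List.pyGetD (pvLine array r) (col + j) ' ') = false) :
    pvAstep array r L col st j = st := by
  unfold pvAstep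
  rcases h with h | h
  · rw [if_neg h]
  · split
    · rw [if_neg (by simp [h])]
    · rfl

theorem pvBstep_skip (array : List String) (r L col : Int) (st : PySem.Set Int × List Int) (c : Int)
    (h : ¬ (0 ≤ c ∧ c < L ∧ PySem.Chars.isdigit (PySem.List.pyGetD (pvLine array r) c ' ') = true)) :
    pvBstep array r L col st c = st := by
  unfold pvBstep
  rw [if_neg h]

theorem pvAstep_eq (array : List String) (r L col : Int) (st : List Int × List Int) (j : Int) (n : Nat)
    (hc : col + j = (n : Int))
    (hC : 0 ≤ col + j ∧ col + j < L ∧ PySem.Chars.isdigit (PySem.List.pyGetD (pvLine array r) (col + j) ' ') = true)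
    (hlen : n < (pvLine array r).length) :
    pvAstep array r L col st j =
      if ¬ (col + j) ∈ st.1 then
        (pvSegI (pvStart (pvLine array r) n) (pvEnd (pvLine array r) n),
         st.2 ++ [pvVal (pvLine array r) n])
      else st := by
  unfold pvAstep
  rw [if_pos ⟨hC.1, hC.2.1⟩, if_pos hC.2.2]
  split
  · simp only
    rw [hc, pvA_getNumber_eq array r n hlen (by unfold pvDig; rw [← hc]; exact hC.2.2)]
    rfl
  · rfl

theorem pvBstep_eq (array : List String) (r L col : Int) (st : PySem.Set Int × List Int) (c : Int) (n : Nat)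
    (hc : c = (n : Int))
    (hC : 0 ≤ c ∧ c < L ∧ PySem.Chars.isdigit (PySem.List.pyGetD (pvLine array r) c ' ') = true)
    (hlen : n < (pvLine array r).length) :
    pvBstep array r L col st c =
      if ¬ st.1.contains ((pvStart (pvLine array r) n : Nat) : Int) then
        (st.1.add ((pvStart (pvLine array r) n : Nat) : Int),
         st.2 ++ [pvVal (pvLine array r) n])
      else st := by
  have hdig : pvDig (pvLine array r) n = true := by unfold pvDig; rw [← hc]; exact hC.2.2
  unfold pvBstep
  rw [if_pos hC]
  simp only
  subst hc
  rw [show ((n : Int)).toNat + 1 = n + 1 from by omega]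
  rw [pvB_left_eq (pvLine array r) n (n + 1) (by omega)]
  rw [pvB_right_eq (pvLine array r) (pvLine array r).length n (by omega)]
  rw [pvSlice_eq_seg (pvLine array r) (pvStart (pvLine array r) n) (pvEnd (pvLine array r) n)
      (le_trans (pvStart_le _ _) (pvEnd_ge _ _)) (pvEnd_lt _ _ hlen)]
  rfl

theorem pvNotC {c L : Int} {d : Bool} (h : ¬ (0 ≤ c ∧ c < L ∧ d = true)) :
    ¬ (0 ≤ c ∧ c < L) ∨ d = false := by
  by_cases h2 : 0 ≤ c ∧ c < L
  · right
    cases hd : d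
    · rfl
    · exact absurd ⟨h2.1, h2.2, hd⟩ h
  · left
    exact h2

theorem pvContains_empty (x : Int) : (PySem.Set.ofList ([] : List Int)).contains x = false := by
  rfl

theorem pvAdd_empty (x : Int) : (PySem.Set.ofList ([] : List Int)).add x = [x] := by
  rfl

set_option maxHeartbeats 1000000 in
theorem pvRow_eq (array : List String) (r L col : Int)
    (hb : ∀ j : Int, j = -1 ∨ j = 0 ∨ j = 1 → 0 ≤ col + j → col + j < L →
      col + j < ((pvLine array r).length : Int)) :
    pvRowA array r L col = pvRowB array r L col := by
  have e0 : col + -1 = col - 1 := by ring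
  have e1 : col + 0 = col := by ring
  unfold pvRowA pvRowB
  simp only [List.foldl_cons, List.foldl_nil]
  by_cases hD0 : 0 ≤ col - 1 ∧ col - 1 < L ∧
      PySem.Chars.isdigit (PySem.List.pyGetD (pvLine array r) (col - 1) ' ') = true
  · -- the left cell is an in-window digit; its run is emitted first
    obtain ⟨h00, h01, h02⟩ := hD0
    set n0 : Nat := (col - 1).toNat with hn0def
    have hn0 : col - 1 = (n0 : Int) := by omega
    have hlen0 : n0 < (pvLine array r).length := by
      have := hb (-1) (by tauto) (by omega) (by omega)
      omega
    have hd0 : pvDig (pvLine array r) n0 = true := by unfold pvDig; rw [← hn0]; exact h02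
    rw [pvAstep_eq array r L col ([], []) (-1) n0 (by omega)
        ⟨by omega, by omega, by rw [e0]; exact h02⟩ hlen0]
    rw [if_pos (by simp)]
    rw [pvBstep_eq array r L col (PySem.Set.ofList [], []) (col - 1) n0 hn0
        ⟨h00, h01, h02⟩ hlen0]
    rw [if_pos (by rw [pvContains_empty]; simp)]
    rw [pvAdd_empty]
    by_cases hD1 : 0 ≤ col ∧ col < L ∧
        PySem.Chars.isdigit (PySem.List.pyGetD (pvLine array r) col ' ') = true
    · -- middle cell continues the same run: both sides skip it
      have hn1 : col = ((n0 + 1 : Nat) : Int) := by omega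
      have hlen1 : n0 + 1 < (pvLine array r).length := by
        have := hb 0 (by tauto) (by omega) (by omega)
        omega
      have hd1 : pvDig (pvLine array r) (n0 + 1) = true := by
        unfold pvDig; rw [← hn1]; exact hD1.2.2
      have hE1 : pvEnd (pvLine array r) n0 = pvEnd (pvLine array r) (n0 + 1) :=
        pvEnd_step _ _ hlen1 hd1
      have hS1 : pvStart (pvLine array r) (n0 + 1) = pvStart (pvLine array r) n0 := by
        rw [pvStart, if_pos hd0]
      have hmem1 : (col + 0) ∈ pvSegI (pvStart (pvLine array r) n0) (pvEnd (pvLine array r) n0) := by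
        rw [pvSegI_mem _ _ _ (le_trans (pvStart_le _ _) (pvEnd_ge _ _))]
        have := pvEnd_ge (pvLine array r) (n0 + 1)
        have := pvStart_le (pvLine array r) n0
        omega
      rw [pvAstep_eq array r L col _ 0 (n0 + 1) (by omega)
          ⟨by omega, by omega, by rw [e1]; exact hD1.2.2⟩ hlen1]
      rw [if_neg (by simpa using hmem1)]
      rw [pvBstep_eq array r L col _ col (n0 + 1) hn1 hD1 hlen1]
      rw [if_neg (by
        simp only [hS1]
        simp [List.contains_eq_mem])]
      by_cases hD2 : 0 ≤ col + 1 ∧ col + 1 < L ∧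
          PySem.Chars.isdigit (PySem.List.pyGetD (pvLine array r) (col + 1) ' ') = true
      · -- right cell continues the run too
        have hn2 : col + 1 = ((n0 + 2 : Nat) : Int) := by omega
        have hlen2 : n0 + 2 < (pvLine array r).length := by
          have := hb 1 (by tauto) (by omega) (by omega)
          omega
        have hd2 : pvDig (pvLine array r) (n0 + 2) = true := by
          unfold pvDig; rw [← hn2]; exact hD2.2.2
        have hE2 : pvEnd (pvLine array r) (n0 + 1) = pvEnd (pvLine array r) (n0 + 2) :=
          pvEnd_step _ _ hlen2 hd2
        have hS2 : pvStart (pvLine array r) (n0 + 2) = pvStart (pvLine array r) n0 := by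
          rw [pvStart, if_pos hd1, hS1]
        have hmem2 : (col + 1) ∈ pvSegI (pvStart (pvLine array r) n0) (pvEnd (pvLine array r) n0) := by
          rw [pvSegI_mem _ _ _ (le_trans (pvStart_le _ _) (pvEnd_ge _ _))]
          have := pvEnd_ge (pvLine array r) (n0 + 2)
          have := pvStart_le (pvLine array r) n0
          omega
        rw [pvAstep_eq array r L col _ 1 (n0 + 2) (by omega) hD2 hlen2]
        rw [if_neg (by simpa using hmem2)]
        rw [pvBstep_eq array r L col _ (col + 1) (n0 + 2) hn2 hD2 hlen2]
        rw [if_neg (by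
          simp only [hS2]
          simp [List.contains_eq_mem])]
      · -- right cell not a digit cell: both sides skip
        rw [pvAstep_skip array r L col _ 1 (pvNotC hD2)]
        rw [pvBstep_skip array r L col _ (col + 1) hD2]
    · -- middle cell not a digit cell
      rw [pvAstep_skip array r L col _ 0 (by rw [e1]; exact pvNotC hD1)]
      rw [pvBstep_skip array r L col _ col hD1]
      by_cases hD2 : 0 ≤ col + 1 ∧ col + 1 < L ∧
          PySem.Chars.isdigit (PySem.List.pyGetD (pvLine array r) (col + 1) ' ') = true
      · -- a separate run starts at the right cell: both sides emit it
        have hn2 : col + 1 = ((n0 + 2 : Nat) : Int) := by omega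
        have hlen2 : n0 + 2 < (pvLine array r).length := by
          have := hb 1 (by tauto) (by omega) (by omega)
          omega
        -- the middle cell is in bounds, so its failure means it is not a digit
        have hnd1 : PySem.Chars.isdigit (PySem.List.pyGetD (pvLine array r) col ' ') = false := by
          rcases pvNotC hD1 with h | h
          · exact absurd ⟨by omega, by omega⟩ h
          · exact h
        have hn1 : col = ((n0 + 1 : Nat) : Int) := by omega
        have hd1 : pvDig (pvLine array r) (n0 + 1) = false := by
          unfold pvDig; rw [← hn1]; exact hnd1
        have hE0 : pvEnd (pvLine array r) n0 = n0 :=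
          pvEnd_stop _ _ (by intro ⟨_, hx⟩; rw [hd1] at hx; exact absurd hx (by simp))
        have hS2 : pvStart (pvLine array r) (n0 + 2) = n0 + 2 := by
          rw [pvStart, if_neg (by simp [hd1])]
        have hnm2 : ¬ (col + 1) ∈ pvSegI (pvStart (pvLine array r) n0) (pvEnd (pvLine array r) n0) := by
          rw [pvSegI_mem _ _ _ (le_trans (pvStart_le _ _) (pvEnd_ge _ _))]
          rw [hE0]
          omega
        rw [pvAstep_eq array r L col _ 1 (n0 + 2) (by omega) hD2 hlen2]
        rw [if_pos (by simpa using hnm2)]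
        rw [pvBstep_eq array r L col _ (col + 1) (n0 + 2) hn2 hD2 hlen2]
        rw [if_pos (by
          simp only [hS2]
          have := pvStart_le (pvLine array r) n0
          simp [List.contains_eq_mem]
          omega)]
      · -- only the left cell emits
        rw [pvAstep_skip array r L col _ 1 (pvNotC hD2)]
        rw [pvBstep_skip array r L col _ (col + 1) hD2]
  · -- left cell not a digit cell
    rw [pvAstep_skip array r L col _ (-1) (by rw [e0]; exact pvNotC hD0)]
    rw [pvBstep_skip array r L col _ (col - 1) hD0]
    by_cases hD1 : 0 ≤ col ∧ col < L ∧
        PySem.Chars.isdigit (PySem.List.pyGetD (pvLine array r) col ' ') = true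
    · -- run through the middle cell is emitted
      set n1 : Nat := col.toNat with hn1def
      have hn1 : col = (n1 : Int) := by omega
      have hlen1 : n1 < (pvLine array r).length := by
        have := hb 0 (by tauto) (by omega) (by omega)
        omega
      have hd1 : pvDig (pvLine array r) n1 = true := by unfold pvDig; rw [← hn1]; exact hD1.2.2
      rw [pvAstep_eq array r L col _ 0 n1 (by omega)
          ⟨by omega, by omega, by rw [e1]; exact hD1.2.2⟩ hlen1]
      rw [if_pos (by simp)]
      rw [pvBstep_eq array r L col _ col n1 hn1 hD1 hlen1]
      rw [if_pos (by rw [pvContains_empty]; simp)]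
      rw [pvAdd_empty]
      by_cases hD2 : 0 ≤ col + 1 ∧ col + 1 < L ∧
          PySem.Chars.isdigit (PySem.List.pyGetD (pvLine array r) (col + 1) ' ') = true
      · -- right cell continues that run: both skip
        have hn2 : col + 1 = ((n1 + 1 : Nat) : Int) := by omega
        have hlen2 : n1 + 1 < (pvLine array r).length := by
          have := hb 1 (by tauto) (by omega) (by omega)
          omega
        have hd2 : pvDig (pvLine array r) (n1 + 1) = true := by
          unfold pvDig; rw [← hn2]; exact hD2.2.2
        have hE2 : pvEnd (pvLine array r) n1 = pvEnd (pvLine array r) (n1 + 1) :=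
          pvEnd_step _ _ hlen2 hd2
        have hS2 : pvStart (pvLine array r) (n1 + 1) = pvStart (pvLine array r) n1 := by
          rw [pvStart, if_pos hd1]
        have hmem2 : (col + 1) ∈ pvSegI (pvStart (pvLine array r) n1) (pvEnd (pvLine array r) n1) := by
          rw [pvSegI_mem _ _ _ (le_trans (pvStart_le _ _) (pvEnd_ge _ _))]
          have := pvEnd_ge (pvLine array r) (n1 + 1)
          have := pvStart_le (pvLine array r) n1
          omega
        rw [pvAstep_eq array r L col _ 1 (n1 + 1) (by omega) hD2 hlen2]
        rw [if_neg (by simpa using hmem2)]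
        rw [pvBstep_eq array r L col _ (col + 1) (n1 + 1) hn2 hD2 hlen2]
        rw [if_neg (by
          simp only [hS2]
          simp [List.contains_eq_mem])]
      · rw [pvAstep_skip array r L col _ 1 (pvNotC hD2)]
        rw [pvBstep_skip array r L col _ (col + 1) hD2]
    · -- neither left nor middle cell is a digit cell
      rw [pvAstep_skip array r L col _ 0 (by rw [e1]; exact pvNotC hD1)]
      rw [pvBstep_skip array r L col _ col hD1]
      by_cases hD2 : 0 ≤ col + 1 ∧ col + 1 < L ∧
          PySem.Chars.isdigit (PySem.List.pyGetD (pvLine array r) (col + 1) ' ') = true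
      · -- only the right cell emits
        set n2 : Nat := (col + 1).toNat with hn2def
        have hn2 : col + 1 = (n2 : Int) := by omega
        have hlen2 : n2 < (pvLine array r).length := by
          have := hb 1 (by tauto) (by omega) (by omega)
          omega
        rw [pvAstep_eq array r L col _ 1 n2 (by omega) hD2 hlen2]
        rw [if_pos (by simp)]
        rw [pvBstep_eq array r L col _ (col + 1) n2 hn2 hD2 hlen2]
        rw [if_pos (by rw [pvContains_empty]; simp)]
      · rw [pvAstep_skip array r L col _ 1 (pvNotC hD2)]
        rw [pvBstep_skip array r L col _ (col + 1) hD2]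

set_option maxHeartbeats 1000000 in
theorem pvMain (array : List String) (row col : Int)
    (hpre : Pre_detect_adjacent_numbers array row col) :
    detect_adjacent_numbers array row col = detect_adjacent_numbers_alt array row col := by
  unfold detect_adjacent_numbers detect_adjacent_numbers_alt
  simp only [List.foldl_cons, List.foldl_nil]
  have key : ∀ r : Int, (r = row - 1 ∨ r = row ∨ r = row + 1) → ∀ out : List Int,
      (if 0 ≤ r ∧ r < ((pvLine array row).length : Int) then
        pvAstep array r ((pvLine array row).length : Int) col (pvAstep array r ((pvLine array row).length : Int) col (pvAstep array r ((pvLine array row).length : Int) col ([], out) (-1)) 0) 1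
      else ([], out)).2
      = (if 0 ≤ r ∧ r < ((pvLine array row).length : Int) then
        pvBstep array r ((pvLine array row).length : Int) col (pvBstep array r ((pvLine array row).length : Int) col (pvBstep array r ((pvLine array row).length : Int) col (PySem.Set.ofList [], out) (col - 1)) col) (col + 1)
      else (PySem.Set.ofList [], out)).2 := by
    intro r hr out
    show (if 0 ≤ r ∧ r < ((pvLine array row).length : Int) then
        (([-1, 0, 1] : List Int).foldl (pvAstep array r ((pvLine array row).length : Int) col) ([], out))
      else ([], out)).2
      = (if 0 ≤ r ∧ r < ((pvLine array row).length : Int) then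
        (([col - 1, col, col + 1] : List Int).foldl (pvBstep array r ((pvLine array row).length : Int) col) (PySem.Set.ofList [], out))
      else (PySem.Set.ofList [], out)).2
    by_cases hg : 0 ≤ r ∧ r < ((pvLine array row).length : Int)
    · rw [if_pos hg, if_pos hg]
      rw [pvAfold_out array r _ col _ ([], out)]
      rw [pvBfold_out array r _ col _ (PySem.Set.ofList [], out)]
      have hb : ∀ j : Int, j = -1 ∨ j = 0 ∨ j = 1 → 0 ≤ col + j → col + j < ((pvLine array row).length : Int) →
          col + j < ((pvLine array r).length : Int) := by
        intro j hj hj0 hjL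
        have hrge : -1 ≤ row := by rcases hr with rfl | rfl | rfl <;> omega
        obtain ⟨_, hcell⟩ := hpre hrge
        have hi : r = row + (r - row) := by ring
        have hmem : (r - row) ∈ ([-1, 0, 1] : List Int) := by
          rcases hr with rfl | rfl | rfl <;> simp
        have := hcell (r - row) hmem (by omega) (by rw [← hi] at *; exact hg.2) j
          (by rcases hj with rfl | rfl | rfl <;> simp) hj0 hjL
        rw [← hi] at this
        exact this.2
      show out ++ pvRowA array r ((pvLine array row).length : Int) col
          = out ++ pvRowB array r ((pvLine array row).length : Int) col
      rw [pvRow_eq array r _ col hb]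
    · rw [if_neg hg, if_neg hg]
  rw [key (row + -1) (by left; ring) []]
  rw [key (row + 0) (by right; left; ring) _]
  rw [key (row + 1) (by right; right; ring) _]
  rw [show row + -1 = row - 1 from by ring]
  rw [show row + 0 = row from by ring]

-- ===== VERDICT (by name: the statement is the Claim_ definition above) =====
theorem detect_adjacent_numbers_spec : Claim_equal_detect_adjacent_numbers := by
  intro array row col _ hpre
  unfold Spec_detect_adjacent_numbers
  exact pvMain array row col hpre
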